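-- pv_equiv track=rewrite | github.com/yasokada/numpy_freeBoundary_171112 | freeBoundary_171112.py | find_hidden_triangleIndex
-- ===== SOURCE A (Python) =====
-- def find_hidden_triangleIndex(tris):
--     overlap = []
--     for lidx in range(len(tris) - 1):
--         for ridx in range(len(tris)):
--             if lidx == ridx:
--                 continue
--             wrk = []
--             for elem in tris[lidx]:
--                 if elem in tris[ridx]:
--                     wrk += [elem]
--             if (len(wrk) == 3):
--                 overlap += [wrk]
--     return overlap
-- ===== SOURCE B (Python) =====
-- def find_hidden_triangleIndex(tris):
--     # Inverted index: value -> indices of triangles containing it (ascending).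
--     index = {}
--     for i, t in enumerate(tris):
--         for e in t:
--             index.setdefault(e, set()).add(i)
--     overlap = []
--     for lidx in range(len(tris) - 1):
--         hits = {}
--         for e in tris[lidx]:
--             for r in index[e]:
--                 hits.setdefault(r, []).append(e)
--         for r in sorted(hits):
--             if r != lidx and len(hits[r]) == 3:
--                 overlap.append(hits[r])
--     return overlap
-- ===== Notes on version B (the rewrite author's own statement) =====
-- stated objective: alternative
-- what changed: A compares every triangle against every other and filters vertex-by-vertex (all pairs, nested membership scans); B instead builds an inverted index vertex->triangles once, then for each left triangle accumulates per-partner hit lists directly from the index and emits the sorted partners with exactly 3 hits; this removes the all-pairs scan (much faster on sparse inputs, comparable when every pair shares vertices).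
import Mathlib
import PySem

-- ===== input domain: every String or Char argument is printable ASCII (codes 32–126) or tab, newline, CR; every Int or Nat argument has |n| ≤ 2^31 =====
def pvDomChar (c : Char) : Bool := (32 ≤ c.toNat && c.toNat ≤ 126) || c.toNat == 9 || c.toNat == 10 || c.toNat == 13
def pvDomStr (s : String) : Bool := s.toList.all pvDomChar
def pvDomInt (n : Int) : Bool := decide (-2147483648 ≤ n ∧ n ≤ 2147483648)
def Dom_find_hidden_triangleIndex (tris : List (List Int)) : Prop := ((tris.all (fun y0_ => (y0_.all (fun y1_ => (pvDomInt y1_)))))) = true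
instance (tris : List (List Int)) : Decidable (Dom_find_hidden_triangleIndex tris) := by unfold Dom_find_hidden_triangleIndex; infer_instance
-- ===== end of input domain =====

-- B replaces A's all-pairs scan by an inverted index (vertex → triangles containing
-- it) from which, per left triangle, the per-partner hit lists are accumulated directly.

-- ===== PORT A =====
def find_hidden_triangleIndex (tris : List (List Int)) : List (List Int) :=
  (PySem.List.pyRange 0 ((tris.length : Int) - 1) 1).foldl (fun overlap lidx =>
    (PySem.List.pyRange 0 (tris.length : Int) 1).foldl (fun overlap ridx =>
      if lidx == ridx then overlap
      else
        let wrk := (PySem.List.pyGetD tris lidx []).foldl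
          (fun wrk elem =>
            if elem ∈ PySem.List.pyGetD tris ridx [] then wrk ++ [elem] else wrk) []
        if wrk.length == 3 then overlap ++ [wrk] else overlap) overlap) []

-- ===== PORT B =====
def find_hidden_triangleIndex_alt (tris : List (List Int)) : List (List Int) :=
  -- index : value -> set of triangle indices containing it
  let index : PySem.Dict Int (PySem.Set Int) :=
    (PySem.List.enumerate tris 0).foldl (fun index p =>
      p.2.foldl (fun index e =>
        index.modify e PySem.Set.empty (fun s => PySem.Set.add s p.1)) index)
      PySem.Dict.empty
  (PySem.List.pyRange 0 ((tris.length : Int) - 1) 1).foldl (fun overlap lidx =>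
    let hits : PySem.Dict Int (List Int) :=
      (PySem.List.pyGetD tris lidx []).foldl (fun hits e =>
        (index.getD e PySem.Set.empty).foldl
          (fun hits r => hits.modify r [] (fun l => l ++ [e])) hits)
        PySem.Dict.empty
    (PySem.List.sorted hits.keys (fun x => x)).foldl (fun overlap r =>
      if r != lidx && (hits.getD r []).length == 3
      then overlap ++ [hits.getD r []] else overlap)
      overlap) []

-- ===== PRECONDITION & SPEC =====
def Spec_find_hidden_triangleIndex (tris : List (List Int)) (out : List (List Int)) : Prop := out = find_hidden_triangleIndex_alt tris
instance (tris : List (List Int)) (out : List (List Int)) : Decidable (Spec_find_hidden_triangleIndex tris out) := by unfold Spec_find_hidden_triangleIndex; infer_instance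

-- ===== CLAIM (what is proved, stated in full; the proofs are below) =====
def Claim_equal_find_hidden_triangleIndex : Prop := ∀ (tris : List (List Int)), Dom_find_hidden_triangleIndex tris → Spec_find_hidden_triangleIndex tris (find_hidden_triangleIndex tris)

-- ===== LEMMAS AND PROOFS =====

-- tris[r] (as read by both ports)
def triAt (tris : List (List Int)) (r : Int) : List Int := PySem.List.pyGetD tris r []

-- the list A calls `wrk` for the pair (l, r)
def filtAt (tris : List (List Int)) (l r : Int) : List Int :=
  (triAt tris l).filter (fun e => decide (e ∈ triAt tris r))

-- B's inverted index, named
def mkIndex (tris : List (List Int)) : PySem.Dict Int (PySem.Set Int) :=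
  (PySem.List.enumerate tris 0).foldl (fun index p =>
    p.2.foldl (fun index e =>
      index.modify e PySem.Set.empty (fun s => PySem.Set.add s p.1)) index)
    PySem.Dict.empty

-- B's per-lidx hit dictionary, named
def mkHits (tris : List (List Int)) (lidx : Int) : PySem.Dict Int (List Int) :=
  (triAt tris lidx).foldl (fun hits e =>
    ((mkIndex tris).getD e PySem.Set.empty).foldl
      (fun hits r => hits.modify r [] (fun l => l ++ [e])) hits)
    PySem.Dict.empty

-- the rows each port appends for a fixed lidx
def rowA (tris : List (List Int)) (lidx : Int) : List (List Int) :=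
  ((PySem.List.pyRange 0 (tris.length : Int) 1).filter
      (fun r => !(lidx == r) && ((filtAt tris lidx r).length == 3))).map (filtAt tris lidx)

def rowB (tris : List (List Int)) (lidx : Int) : List (List Int) :=
  ((PySem.List.sorted (mkHits tris lidx).keys (fun x => x)).filter
      (fun r => r != lidx && (((mkHits tris lidx).getD r []).length == 3))).map
    (fun r => (mkHits tris lidx).getD r [])

-- Prop-conditioned variant of PySem.List.foldl_append_if
lemma foldl_ite_mem_filter {α : Type} (p : α → Prop) [DecidablePred p] (l : List α) (acc : List α) :
    l.foldl (fun acc x => if p x then acc ++ [x] else acc) acc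
      = acc ++ (l.filter (fun x => decide (p x))).map id := by
  rw [← PySem.List.foldl_append_if (fun x => decide (p x)) id l acc]
  apply PySem.List.foldl_congr_mem
  intro acc x _
  by_cases h : p x <;> simp [h]

-- ============ the inverted index ============

-- inner loop of the index build: one triangle t with index i
lemma idx_inner (t : List Int) (d : PySem.Dict Int (PySem.Set Int)) (i : Int)
    (hd : ∀ e, ∀ x ∈ d.getD e PySem.Set.empty, x ≤ i) (e : Int) :
    (t.foldl (fun d e' => d.modify e' PySem.Set.empty (fun s => PySem.Set.add s i)) d).getD e PySem.Set.empty
      = if e ∈ t ∧ i ∉ d.getD e PySem.Set.empty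
        then d.getD e PySem.Set.empty ++ [i] else d.getD e PySem.Set.empty := by
  induction t generalizing d with
  | nil => simp
  | cons a t ih =>
    simp only [List.foldl_cons]
    have hmod : ∀ k, ((d.modify a PySem.Set.empty (fun s => PySem.Set.add s i)).getD k PySem.Set.empty)
        = if k = a then PySem.Set.add (d.getD a PySem.Set.empty) i else d.getD k PySem.Set.empty := by
      intro k
      rw [PySem.Dict.getD_modify]
    have hd' : ∀ e' x, x ∈ (d.modify a PySem.Set.empty (fun s => PySem.Set.add s i)).getD e' PySem.Set.empty → x ≤ i := by
      intro e' x hx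
      rw [hmod] at hx
      split at hx
      · rw [PySem.Set.add_eq_ite] at hx
        split at hx
        · exact hd _ x hx
        · rcases List.mem_append.1 hx with h | h
          · exact hd _ x h
          · simp only [List.mem_singleton] at h
            omega
      · exact hd _ x hx
    rw [ih _ hd', hmod e]
    by_cases he : e = a
    · subst he
      rw [if_pos rfl]
      by_cases him : i ∈ d.getD e PySem.Set.empty
      · rw [PySem.Set.add_of_mem him]
        rw [if_neg (fun h => h.2 him), if_neg (fun h : e ∈ e :: t ∧ i ∉ d.getD e PySem.Set.empty => h.2 him)]
      · rw [PySem.Set.add_of_not_mem him]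
        have h1 : ¬ (e ∈ t ∧ i ∉ (d.getD e PySem.Set.empty ++ [i])) := by
          intro h
          exact h.2 (List.mem_append.2 (Or.inr (List.mem_singleton.2 rfl)))
        rw [if_neg h1, if_pos ⟨List.mem_cons_self, him⟩]
    · rw [if_neg he]
      by_cases het : e ∈ t ∧ i ∉ d.getD e PySem.Set.empty
      · rw [if_pos het, if_pos ⟨List.mem_cons_of_mem a het.1, het.2⟩]
      · rw [if_neg het]
        have : ¬ (e ∈ a :: t ∧ i ∉ d.getD e PySem.Set.empty) := by
          intro h
          exact het ⟨(List.mem_cons.1 h.1).resolve_left he, h.2⟩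
        rw [if_neg this]

-- outer loop of the index build, with offset s
lemma idx_outer (xs : List (List Int)) (s : Int) (d : PySem.Dict Int (PySem.Set Int))
    (hd : ∀ e, ∀ x ∈ d.getD e PySem.Set.empty, x < s) (e : Int) :
    ((PySem.List.enumerate xs s).foldl (fun d p =>
        p.2.foldl (fun d e' => d.modify e' PySem.Set.empty (fun s' => PySem.Set.add s' p.1)) d) d).getD e PySem.Set.empty
      = d.getD e PySem.Set.empty
          ++ ((PySem.List.enumerate xs s).filter (fun p => decide (e ∈ p.2))).map (·.1) := by
  induction xs generalizing s d with
  | nil => simp [PySem.List.enumerate_nil]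
  | cons t xs ih =>
    rw [PySem.List.enumerate_cons]
    simp only [List.foldl_cons, List.filter_cons]
    have hins : ∀ e', s ∉ d.getD e' PySem.Set.empty := by
      intro e' hx
      exact absurd (hd e' s hx) (lt_irrefl s)
    have hstep : ∀ e',
        (t.foldl (fun d e' => d.modify e' PySem.Set.empty (fun s' => PySem.Set.add s' s)) d).getD e' PySem.Set.empty
          = if e' ∈ t then d.getD e' PySem.Set.empty ++ [s] else d.getD e' PySem.Set.empty := by
      intro e'
      rw [idx_inner t d s (fun e' x hx => le_of_lt (hd e' x hx)) e']
      by_cases h : e' ∈ t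
      · rw [if_pos ⟨h, hins e'⟩, if_pos h]
      · rw [if_neg (fun hc => h hc.1), if_neg h]
    rw [ih (s + 1) _ ?inv]
    case inv =>
      intro e' x hx
      rw [hstep e'] at hx
      by_cases h : e' ∈ t
      · rw [if_pos h] at hx
        rcases List.mem_append.1 hx with h' | h'
        · exact lt_trans (hd e' x h') (by omega)
        · simp only [List.mem_singleton] at h'
          omega
      · rw [if_neg h] at hx
        exact lt_trans (hd e' x hx) (by omega)
    rw [hstep e]
    by_cases h : e ∈ t <;> simp [h]

lemma mkIndex_getD (tris : List (List Int)) (e : Int) :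
    (mkIndex tris).getD e PySem.Set.empty
      = ((PySem.List.enumerate tris 0).filter (fun p => decide (e ∈ p.2))).map (·.1) := by
  unfold mkIndex
  rw [idx_outer tris 0 PySem.Dict.empty (by simp [PySem.Dict.getD_empty]) e]
  simp [PySem.Dict.getD_empty]

-- membership in a filtered-enumerate index list
lemma mem_enum_filter_map (xs : List (List Int)) (s r : Int) (q : List Int → Bool) :
    (r ∈ ((PySem.List.enumerate xs s).filter (fun p => q p.2)).map (·.1))
      ↔ ∃ k : Nat, k < xs.length ∧ r = s + k ∧ q (xs.getD k []) = true := by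
  induction xs generalizing s with
  | nil => simp [PySem.List.enumerate_nil]
  | cons t xs ih =>
    rw [PySem.List.enumerate_cons]
    simp only [List.filter_cons]
    constructor
    · intro h
      by_cases hq : q t
      · rw [if_pos (by simpa using hq), List.map_cons, List.mem_cons] at h
        rcases h with rfl | h
        · exact ⟨0, by simp, by simp, by simpa using hq⟩
        · rcases (ih (s + 1)).1 h with ⟨k, hk, hr, hqk⟩
          exact ⟨k + 1, by simpa using Nat.succ_lt_succ hk, by push_cast; omega,
            by simpa using hqk⟩
      · rw [if_neg (by simpa using hq)] at h
        rcases (ih (s + 1)).1 h with ⟨k, hk, hr, hqk⟩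
        exact ⟨k + 1, by simpa using Nat.succ_lt_succ hk, by push_cast; omega,
          by simpa using hqk⟩
    · rintro ⟨k, hk, hr, hqk⟩
      cases k with
      | zero =>
        simp only [List.getD_cons_zero] at hqk
        have hrs : r = s := by simpa using hr
        subst hrs
        rw [if_pos (by simpa using hqk)]
        simp
      | succ k =>
        simp only [List.getD_cons_succ] at hqk
        simp only [List.length_cons] at hk
        have hmem : r ∈ (List.map (fun x => x.1)
            (List.filter (fun p => q p.2) (PySem.List.enumerate xs (s + 1)))) :=
          (ih (s + 1)).2 ⟨k, by omega, by push_cast at hr ⊢; omega, hqk⟩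
        by_cases hq : q t
        · rw [if_pos (by simpa using hq), List.map_cons]
          exact List.mem_cons_of_mem _ hmem
        · rw [if_neg (by simpa using hq)]
          exact hmem

lemma mkIndex_mem (tris : List (List Int)) (e r : Int) :
    r ∈ (mkIndex tris).getD e PySem.Set.empty
      ↔ 0 ≤ r ∧ r < (tris.length : Int) ∧ e ∈ triAt tris r := by
  rw [mkIndex_getD, mem_enum_filter_map tris 0 r (fun t => decide (e ∈ t))]
  constructor
  · rintro ⟨k, hk, rfl, hqk⟩
    refine ⟨by omega, by omega, ?_⟩
    have : triAt tris ((0 : Int) + k) = tris.getD k [] := by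
      simp [triAt, show ((0 : Int) + k) = (k : Int) by omega]
    rw [this]
    simpa using hqk
  · rintro ⟨h0, h1, hmem⟩
    obtain ⟨k, rfl⟩ : ∃ k : Nat, r = (k : Int) := ⟨r.toNat, by omega⟩
    refine ⟨k, by omega, by omega, ?_⟩
    have ht : triAt tris (k : Int) = tris.getD k [] := by simp [triAt]
    rw [ht] at hmem
    simpa using hmem

lemma mkIndex_pairwise (tris : List (List Int)) (e : Int) :
    ((mkIndex tris).getD e PySem.Set.empty).Pairwise (· < ·) := by
  rw [mkIndex_getD]
  have h1 : ((PySem.List.enumerate tris 0).map (·.1)).Pairwise (· < ·) := by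
    rw [PySem.List.map_fst_enumerate]
    exact PySem.List.pairwise_lt_pyRange_one 0 (0 + tris.length)
  exact List.Pairwise.sublist (List.Sublist.map _ List.filter_sublist) h1

lemma mkIndex_nodup (tris : List (List Int)) (e : Int) :
    ((mkIndex tris).getD e PySem.Set.empty).Nodup :=
  (mkIndex_pairwise tris e).nodup

-- ============ the hits dictionary ============

-- the flattened (partner, element) stream B processes for a fixed lidx
def hitStream (tris : List (List Int)) (lidx : Int) : List (Int × Int) :=
  (triAt tris lidx).flatMap (fun e => ((mkIndex tris).getD e PySem.Set.empty).map (fun r => (r, e)))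

lemma mkHits_eq_flat (tris : List (List Int)) (lidx : Int) :
    mkHits tris lidx
      = (hitStream tris lidx).foldl (fun d p => d.modify p.1 [] (fun l => l ++ [p.2])) PySem.Dict.empty := by
  unfold mkHits hitStream
  rw [List.foldl_flatMap]
  simp [List.foldl_map]

lemma nodup_filter_beq (l : List Int) (r : Int) (hl : l.Nodup) :
    l.filter (fun x => x == r) = if r ∈ l then [r] else [] := by
  induction l with
  | nil => simp
  | cons a l ih =>
    rcases List.nodup_cons.1 hl with ⟨ha, hl'⟩
    rw [List.filter_cons, ih hl']
    by_cases h : a = r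
    · subst h
      simp [ha]
    · simp [h, show r ≠ a from fun h' => h h'.symm]

lemma mkHits_getD (tris : List (List Int)) (lidx r : Int) :
    (mkHits tris lidx).getD r []
      = (triAt tris lidx).filter (fun e => decide (r ∈ (mkIndex tris).getD e PySem.Set.empty)) := by
  rw [mkHits_eq_flat, PySem.Dict.getD_foldl_modify_append, PySem.Dict.getD_empty]
  unfold hitStream
  rw [List.filter_flatMap, List.map_flatMap]
  simp only [List.nil_append]
  have key : ∀ e : Int,
      ((((mkIndex tris).getD e PySem.Set.empty).map (fun r' => (r', e))).filter
          (fun p => p.1 == r)).map (fun p => p.2)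
        = if r ∈ (mkIndex tris).getD e PySem.Set.empty then [e] else [] := by
    intro e
    rw [List.filter_map]
    have : ((fun p : Int × Int => p.1 == r) ∘ fun r' => (r', e)) = fun x => x == r := rfl
    rw [this, nodup_filter_beq _ r (mkIndex_nodup tris e)]
    by_cases h : r ∈ (mkIndex tris).getD e PySem.Set.empty <;>
      simp only [PySem.Set.empty_eq] at h ⊢ <;> simp [h]
  calc (triAt tris lidx).flatMap (fun e =>
          ((((mkIndex tris).getD e PySem.Set.empty).map (fun r' => (r', e))).filter
              (fun p => p.1 == r)).map (fun p => p.2))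
      = (triAt tris lidx).flatMap (fun e =>
          if r ∈ (mkIndex tris).getD e PySem.Set.empty then [e] else []) := by
        exact List.flatMap_congr (fun e _ => key e)
    _ = (triAt tris lidx).filter (fun e => decide (r ∈ (mkIndex tris).getD e PySem.Set.empty)) := by
        induction triAt tris lidx with
        | nil => simp
        | cons a t ih =>
          rw [List.flatMap_cons, List.filter_cons, ih]
          by_cases h : r ∈ (mkIndex tris).getD a PySem.Set.empty <;>
            simp only [PySem.Set.empty_eq] at h ⊢ <;> simp [h]

lemma mkHits_getD_inrange (tris : List (List Int)) (lidx r : Int)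
    (h0 : 0 ≤ r) (h1 : r < (tris.length : Int)) :
    (mkHits tris lidx).getD r [] = filtAt tris lidx r := by
  rw [mkHits_getD]
  unfold filtAt
  apply List.filter_congr
  intro e _
  have hiff := mkIndex_mem tris e r
  simp only [PySem.Set.empty_eq] at hiff
  by_cases h : e ∈ triAt tris r
  · simp [hiff, h, h0, h1]
  · simp [hiff, h]

lemma mkHits_keys_mem (tris : List (List Int)) (lidx r : Int) :
    r ∈ (mkHits tris lidx).keys ↔ ∃ e ∈ triAt tris lidx, r ∈ (mkIndex tris).getD e PySem.Set.empty := by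
  rw [mkHits_eq_flat]
  rw [PySem.Dict.keys_foldl_modify_key (hitStream tris lidx) Prod.fst ([] : List Int)
        (fun _ p l => l ++ [p.2]) PySem.Dict.empty]
  have : (PySem.Dict.empty : PySem.Dict Int (List Int)).keys = [] := rfl
  rw [this, PySem.Set.update_nil_left, PySem.Set.mem_ofList]
  unfold hitStream
  simp only [List.map_flatMap, List.mem_flatMap, List.mem_map]
  constructor
  · rintro ⟨e, he, a, ⟨r', hr', rfl⟩, hfst⟩
    simp only at hfst
    subst hfst
    exact ⟨e, he, hr'⟩
  · rintro ⟨e, he, hr⟩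
    exact ⟨e, he, (r, e), ⟨r, hr, rfl⟩, rfl⟩

lemma mkHits_keys_nodup (tris : List (List Int)) (lidx : Int) :
    (mkHits tris lidx).keys.Nodup := by
  rw [mkHits_eq_flat]
  exact PySem.Dict.nodup_keys_foldl_modify_key (hitStream tris lidx) Prod.fst ([] : List Int)
    (fun _ p l => l ++ [p.2]) PySem.Dict.empty PySem.Dict.nodup_keys_empty

lemma sorted_keys (tris : List (List Int)) (lidx : Int) :
    PySem.List.sorted (mkHits tris lidx).keys (fun x => x)
      = (PySem.List.pyRange 0 (tris.length : Int) 1).filter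
          (fun r => decide (r ∈ (mkHits tris lidx).keys)) := by
  apply PySem.List.sorted_eq_of_perm_of_pairwise_lt
  · rw [List.perm_ext_iff_of_nodup ((PySem.List.nodup_pyRange_one 0 tris.length).filter _)
        (mkHits_keys_nodup tris lidx)]
    intro a
    simp only [List.mem_filter, PySem.List.mem_pyRange_one, decide_eq_true_eq]
    constructor
    · exact fun h => h.2
    · intro h
      refine ⟨?_, h⟩
      rcases (mkHits_keys_mem tris lidx a).1 h with ⟨e, _, hr⟩
      rcases (mkIndex_mem tris e a).1 hr with ⟨h0, h1, _⟩
      exact ⟨h0, h1⟩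
  · exact (PySem.List.pairwise_lt_pyRange_one 0 tris.length).filter _

-- ============ row and whole-program equality ============

lemma row_eq (tris : List (List Int)) (lidx : Int) :
    rowA tris lidx = rowB tris lidx := by
  unfold rowA rowB
  rw [sorted_keys, List.filter_filter]
  have hfilt : ∀ r ∈ PySem.List.pyRange 0 (tris.length : Int) 1,
      (!(lidx == r) && ((filtAt tris lidx r).length == 3))
        = ((r != lidx && (((mkHits tris lidx).getD r []).length == 3)) &&
            decide (r ∈ (mkHits tris lidx).keys)) := by
    intro r hr
    rcases PySem.List.mem_pyRange_one.1 hr with ⟨h0, h1⟩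
    rw [mkHits_getD_inrange tris lidx r h0 h1]
    by_cases hl : lidx = r
    · simp [hl]
    · by_cases h3 : (filtAt tris lidx r).length = 3
      · have hne : filtAt tris lidx r ≠ [] := by
          intro h
          rw [h] at h3
          simp at h3
        have hkey : r ∈ (mkHits tris lidx).keys := by
          rcases List.exists_mem_of_ne_nil _ hne with ⟨e, he⟩
          unfold filtAt at he
          rw [List.mem_filter] at he
          exact (mkHits_keys_mem tris lidx r).2
            ⟨e, he.1, (mkIndex_mem tris e r).2 ⟨h0, h1, by simpa using he.2⟩⟩
        have hx : (lidx == r) = false := by simpa using hl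
        have hy : (r != lidx) = true := by simpa [bne] using Ne.symm hl
        simp [hx, hy, h3, hkey]
      · have hx : (lidx == r) = false := by simpa using hl
        have hz : ((filtAt tris lidx r).length == 3) = false := by simpa using h3
        simp [hx, hz]
  rw [List.filter_congr hfilt]
  apply List.map_congr_left
  intro r hr
  rcases PySem.List.mem_pyRange_one.1 (List.mem_filter.1 hr).1 with ⟨h0, h1⟩
  exact (mkHits_getD_inrange tris lidx r h0 h1).symm

lemma A_eq (tris : List (List Int)) :
    find_hidden_triangleIndex tris
      = (PySem.List.pyRange 0 ((tris.length : Int) - 1) 1).foldl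
          (fun acc l => acc ++ rowA tris l) [] := by
  unfold find_hidden_triangleIndex
  apply PySem.List.foldl_congr_mem
  intro acc lidx _
  have hbody : ∀ (ov : List (List Int)), ∀ r ∈ PySem.List.pyRange 0 (tris.length : Int) 1,
      (if lidx == r then ov
       else
         let wrk := (PySem.List.pyGetD tris lidx []).foldl
           (fun wrk elem =>
             if elem ∈ PySem.List.pyGetD tris r [] then wrk ++ [elem] else wrk) []
         if wrk.length == 3 then ov ++ [wrk] else ov)
        = (if (!(lidx == r) && ((filtAt tris lidx r).length == 3)) = true
           then ov ++ [filtAt tris lidx r] else ov) := by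
    intro ov r _
    have hwrk : (PySem.List.pyGetD tris lidx []).foldl
        (fun wrk elem =>
          if elem ∈ PySem.List.pyGetD tris r [] then wrk ++ [elem] else wrk) []
        = filtAt tris lidx r := by
      rw [foldl_ite_mem_filter (fun elem => elem ∈ PySem.List.pyGetD tris r [])]
      simp only [List.map_id, List.nil_append]
      rfl
    by_cases hl : lidx = r
    · simp [hl]
    · simp only [beq_iff_eq, hl]
      rw [hwrk]
      by_cases h3 : (filtAt tris lidx r).length = 3 <;> simp [hl, h3]
  rw [PySem.List.foldl_congr_mem _ _ _ acc hbody]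
  exact PySem.List.foldl_append_if _ _ _ _

lemma B_eq (tris : List (List Int)) :
    find_hidden_triangleIndex_alt tris
      = (PySem.List.pyRange 0 ((tris.length : Int) - 1) 1).foldl
          (fun acc l => acc ++ rowB tris l) [] := by
  have h1 : find_hidden_triangleIndex_alt tris
      = (PySem.List.pyRange 0 ((tris.length : Int) - 1) 1).foldl (fun overlap lidx =>
          (PySem.List.sorted (mkHits tris lidx).keys (fun x => x)).foldl (fun overlap r =>
            if r != lidx && (((mkHits tris lidx).getD r []).length == 3)
            then overlap ++ [(mkHits tris lidx).getD r []] else overlap) overlap) [] := rfl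
  rw [h1]
  apply PySem.List.foldl_congr_mem
  intro acc lidx _
  exact PySem.List.foldl_append_if _ _ _ _

-- ===== VERDICT (by name: the statement is the Claim_ definition above) =====
theorem find_hidden_triangleIndex_spec : Claim_equal_find_hidden_triangleIndex := by
  intro tris _
  show find_hidden_triangleIndex tris = find_hidden_triangleIndex_alt tris
  rw [A_eq, B_eq]
  exact PySem.List.foldl_congr_mem _ _ _ _ (fun acc l _ => by rw [row_eq])
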